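-- pv_equiv track=rewrite | github.com/fzamore/advent-of-code | 2021/day12.py | hasMultipleLowerNodes
-- ===== SOURCE A (Python) =====
-- def hasMultipleLowerNodes(path):
--     s = set()
--     for node in path:
--         if not node.islower():
--             continue
--         if node in s:
--             return True
--         s.add(node)
--     return False
-- ===== SOURCE B (Python) =====
-- def hasMultipleLowerNodes(path):
--     lowers = sorted(n for n in path if n.islower())
--     return any(a == b for a, b in zip(lowers, lowers[1:]))
-- ===== Notes on version B (the rewrite author's own statement) =====
-- stated objective: alternative
-- what changed: Replaces the early-exit set-membership loop by sort-then-scan: sort the lowercase nodes and report whether any two adjacent sorted elements are equal.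
import Mathlib
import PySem

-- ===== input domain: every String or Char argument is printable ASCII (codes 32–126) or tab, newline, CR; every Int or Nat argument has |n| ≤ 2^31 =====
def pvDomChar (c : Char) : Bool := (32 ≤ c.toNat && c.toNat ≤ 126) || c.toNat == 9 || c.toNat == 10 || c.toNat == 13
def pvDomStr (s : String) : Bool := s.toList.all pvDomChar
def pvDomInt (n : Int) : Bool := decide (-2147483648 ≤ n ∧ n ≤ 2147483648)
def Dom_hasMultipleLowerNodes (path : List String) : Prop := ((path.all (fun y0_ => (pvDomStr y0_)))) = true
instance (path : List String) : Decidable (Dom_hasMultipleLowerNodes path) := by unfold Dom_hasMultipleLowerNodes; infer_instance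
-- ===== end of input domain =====

-- B replaces A's early-exit set-membership loop by sort-then-scan: sort the lowercase nodes
-- and report whether any two adjacent sorted elements are equal (objective: alternative).

-- ===== PORT A =====
-- str.islower(), ported by hand (PySem has only the per-char islower/isupper): on the ASCII
-- domain the cased characters are exactly the letters, so s.islower() is "some lowercase
-- letter occurs and no uppercase letter occurs" — exact on the stated printable-ASCII domain.
def pyStrIslower (s : String) : Bool :=
  s.toList.any (fun c => PySem.Chars.islower c) && s.toList.all (fun c => !PySem.Chars.isupper c)

def hasMultipleLowerNodesAux : List String → PySem.Set String → Bool
  | [], _ => false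
  | node :: rest, s =>
    if !pyStrIslower node then hasMultipleLowerNodesAux rest s
    else if PySem.Set.contains s node then true
    else hasMultipleLowerNodesAux rest (PySem.Set.add s node)

def hasMultipleLowerNodes (path : List String) : Bool :=
  hasMultipleLowerNodesAux path PySem.Set.empty

-- ===== PORT B =====
def hasMultipleLowerNodes_alt (path : List String) : Bool :=
  let lowers := PySem.List.sorted (path.filter (fun n => pyStrIslower n)) (fun x => x) false
  (lowers.zip (PySem.List.slice lowers (some 1) none)).any (fun p => p.1 == p.2)

-- ===== PRECONDITION & SPEC =====
def Spec_hasMultipleLowerNodes (path : List String) (out : Bool) : Prop := out = hasMultipleLowerNodes_alt path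
instance (path : List String) (out : Bool) : Decidable (Spec_hasMultipleLowerNodes path out) := by unfold Spec_hasMultipleLowerNodes; infer_instance

-- ===== CLAIM (what is proved, stated in full; the proofs are below) =====
def Claim_equal_hasMultipleLowerNodes : Prop := ∀ (path : List String), Dom_hasMultipleLowerNodes path → Spec_hasMultipleLowerNodes path (hasMultipleLowerNodes path)

-- ===== LEMMAS AND PROOFS =====

-- A's loop, run from any duplicate-free seen-set s, answers whether s ++ (lowercase nodes of path) has a repeat.
theorem aux_eq_not_nodup (path : List String) (s : PySem.Set String) (hs : s.Nodup) :
    hasMultipleLowerNodesAux path s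
      = decide ¬ (s ++ path.filter (fun n => pyStrIslower n)).Nodup := by
  induction path generalizing s with
  | nil => simp [hasMultipleLowerNodesAux, hs]
  | cons node rest ih =>
    by_cases hf : pyStrIslower node
    · by_cases hc : PySem.Set.contains s node
      · have hmem : node ∈ s := (PySem.Set.contains_iff s node).mp hc
        have : ¬ (s ++ node :: rest.filter (fun n => pyStrIslower n)).Nodup := by
          intro h
          exact (List.disjoint_of_nodup_append h) hmem (List.mem_cons_self ..)
        simp only [hasMultipleLowerNodesAux, hf, hc, Bool.not_true, Bool.false_eq_true,
          if_false, if_true, List.filter_cons, this, not_false_eq_true, decide_true]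
      · have hmem : node ∉ s := fun h => hc ((PySem.Set.contains_iff s node).mpr h)
        have hadd : PySem.Set.add s node = s ++ [node] := PySem.Set.add_of_not_mem hmem
        have hnd : (PySem.Set.add s node).Nodup := PySem.Set.nodup_add _ _ hs
        have h2 := ih (PySem.Set.add s node) hnd
        rw [hadd] at h2
        simp only [hasMultipleLowerNodesAux, hf, hc, Bool.not_true, Bool.false_eq_true,
          if_false, if_true, List.filter_cons, hadd, h2, List.append_assoc,
          List.singleton_append]
    · simp only [hasMultipleLowerNodesAux, hf, Bool.not_false, if_true, List.filter_cons,
        Bool.false_eq_true, if_false]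
      exact ih s hs

-- For a (≤)-sorted list, some adjacent pair is equal iff the list has a repeat.
theorem adj_dup_of_pairwise (l : List String) (hp : l.Pairwise (· ≤ ·)) :
    ((l.zip l.tail).any (fun p => p.1 == p.2)) = decide ¬ l.Nodup := by
  induction l with
  | nil => simp
  | cons a t ih =>
    cases t with
    | nil => simp
    | cons b t' =>
      have hab : a ≤ b := (List.pairwise_cons.mp hp).1 b (List.mem_cons_self ..)
      have hpt : (b :: t').Pairwise (· ≤ ·) := (List.pairwise_cons.mp hp).2
      by_cases heq : a = b
      · subst heq
        simp [List.zip, List.any_cons, List.nodup_cons]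
      · have hlt : a < b := lt_of_le_of_ne hab heq
        have hnotmem : a ∉ b :: t' := by
          intro hmem
          rcases List.mem_cons.mp hmem with h1 | h2
          · exact heq h1
          · have hbx : b ≤ a := (List.pairwise_cons.mp hpt).1 a h2
            exact absurd (lt_of_lt_of_le hlt hbx) (lt_irrefl a)
        have := ih hpt
        simp only [List.tail_cons, List.zip_cons_cons, List.any_cons] at this ⊢
        simp [heq, this, List.nodup_cons, hnotmem]

-- ===== VERDICT (by name: the statement is the Claim_ definition above) =====
theorem hasMultipleLowerNodes_spec : Claim_equal_hasMultipleLowerNodes := by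
  intro path _
  unfold Spec_hasMultipleLowerNodes hasMultipleLowerNodes hasMultipleLowerNodes_alt
  rw [aux_eq_not_nodup path PySem.Set.empty (by simp [PySem.Set.empty])]
  simp only [PySem.List.slice_from_one]
  rw [adj_dup_of_pairwise _ (PySem.List.sorted_pairwise ..)]
  have hperm : (PySem.List.sorted (path.filter (fun n => pyStrIslower n)) (fun x => x) false).Perm
      (path.filter (fun n => pyStrIslower n)) := PySem.List.sorted_perm ..
  simp [hperm.nodup_iff, PySem.Set.empty]
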